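-- pv_equiv track=rewrite | github.com/netotz/python-sandbox | leetcode-like/potholes.py | solve_rec
-- ===== SOURCE A (Python) =====
-- POTHOLE = "x"
--
-- L1 = 1
--
-- L2 = -1
--
-- def solve_rec(l1: list[str], l2: list[str]) -> int:
--     """
--     original recursive solution, no memory
--
--     time O(2**n)
--
--     space O(n)
--     """
--
--     def dfs(lane: int, i=0, currsum=0, parent_id: tuple[int, int] = (0, -1)):
--         if i >= len(l1):
--             return currsum
--
--         road = l1 if lane == L1 else l2
--         pot = 1 if road[i] == POTHOLE else 0
--         newsum = currsum + pot
--
--         curr_id = (lane, i)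
--
--         go_right = dfs(lane, i + 1, newsum, curr_id)
--
--         # if last step switched lane
--         if (-lane, i) == parent_id:
--             # avoid going back by switching lane again
--             return go_right
--
--         switch_lane = dfs(-lane, i, newsum, curr_id)
--         return min(go_right, switch_lane)
--
--     # O(2**n)? O(n**2)?
--     minpath = min(dfs(L1), dfs(L2))
--
--     # O(n)
--     total = sum(1 for l in l1 + l2 if l == POTHOLE)
--
--     # count total, subtract
--     return total - minpath
-- ===== SOURCE B (Python) =====
-- POTHOLE = "x"
--
-- def solve_rec(l1: list[str], l2: list[str]) -> int:
--     # O(n) right-to-left DP over (lane, index) instead of exponential recursion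
--     a = b = 0  # min potholes on a path from index i to the end, entering on lane 1 / lane 2
--     for c1, c2 in reversed(list(zip(l1, l2))):
--         p1 = 1 if c1 == POTHOLE else 0
--         p2 = 1 if c2 == POTHOLE else 0
--         a, b = p1 + min(a, p2 + b), p2 + min(b, p1 + a)
--     total = (l1 + l2).count(POTHOLE)
--     return total - min(a, b)
-- ===== Notes on version B (the rewrite author's own statement) =====
-- stated objective: faster
-- what changed: Replaced the exponential branching recursion (with a parent-id guard against switching back) by a single right-to-left O(n) dynamic-programming pass keeping the two lane values.
import Mathlib
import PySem

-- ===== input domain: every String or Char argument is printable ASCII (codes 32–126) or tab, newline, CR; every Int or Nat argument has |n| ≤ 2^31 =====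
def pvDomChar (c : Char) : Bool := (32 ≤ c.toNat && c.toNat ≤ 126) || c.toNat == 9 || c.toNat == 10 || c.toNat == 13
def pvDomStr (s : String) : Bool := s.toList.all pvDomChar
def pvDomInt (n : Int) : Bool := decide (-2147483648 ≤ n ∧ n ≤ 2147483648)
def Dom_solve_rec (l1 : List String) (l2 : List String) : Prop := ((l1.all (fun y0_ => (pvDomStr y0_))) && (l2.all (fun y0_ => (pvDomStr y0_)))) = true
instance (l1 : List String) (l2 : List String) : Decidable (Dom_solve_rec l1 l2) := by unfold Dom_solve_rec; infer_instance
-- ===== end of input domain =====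

-- B replaces A's exponential branching recursion by one right-to-left O(n) DP pass (objective: faster, asymptotic).

-- ===== PORT A =====
-- the inner recursive dfs; road[i] is in range on every reachable call under Pre_ (i < len l1 ≤ len l2),
-- so pyGetD with default "" is exact there
-- fuel makes the recursion structural; the driver passes more fuel than any call path uses,
-- so the fuel-0 branch is unreachable and the computation is exactly A's
def solve_rec.dfs (l1 l2 : List String) (fuel : Nat) (lane : Int) (i : Nat) (currsum : Int) (parent_id : Int × Int) : Int :=
  match fuel with
  | 0 => currsum
  | fuel + 1 =>
    if l1.length ≤ i then currsum
    else
      let road := if lane = 1 then l1 else l2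
      let pot : Int := if PySem.List.pyGetD road (i : Int) "" = "x" then 1 else 0
      let newsum := currsum + pot
      let curr_id : Int × Int := (lane, (i : Int))
      let go_right := solve_rec.dfs l1 l2 fuel lane (i + 1) newsum curr_id
      if (-lane, (i : Int)) = parent_id then go_right
      else min go_right (solve_rec.dfs l1 l2 fuel (-lane) i newsum curr_id)

def solve_rec (l1 : List String) (l2 : List String) : Int :=
  let minpath := min (solve_rec.dfs l1 l2 (2 * l1.length + 2) 1 0 0 (0, -1))
    (solve_rec.dfs l1 l2 (2 * l1.length + 2) (-1) 0 0 (0, -1))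
  let total : Int := (((l1 ++ l2).filter (fun l => l == "x")).map (fun _ => (1 : Int))).sum
  total - minpath

-- ===== PORT B =====
def solve_rec_alt.step : Int × Int → String × String → Int × Int := fun ab cs =>
  let p1 : Int := if cs.1 = "x" then 1 else 0
  let p2 : Int := if cs.2 = "x" then 1 else 0
  (p1 + min ab.1 (p2 + ab.2), p2 + min ab.2 (p1 + ab.1))

def solve_rec_alt (l1 : List String) (l2 : List String) : Int :=
  let ab := ((l1.zip l2).reverse).foldl solve_rec_alt.step (0, 0)
  let total : Int := (PySem.List.count (l1 ++ l2) "x" : Int)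
  total - min ab.1 ab.2

-- ===== PRECONDITION & SPEC =====
-- Pre_ excludes exactly the inputs where A raises IndexError: with len(l1) > len(l2) the dfs on lane 2 reads l2[i] past the end.
def Pre_solve_rec (l1 : List String) (l2 : List String) : Prop := l1.length ≤ l2.length
instance (l1 : List String) (l2 : List String) : Decidable (Pre_solve_rec l1 l2) := by unfold Pre_solve_rec; infer_instance

def pvWitness_solve_rec : List String × List String := (["x", "."], [".", "x"])

def Spec_solve_rec (l1 : List String) (l2 : List String) (out : Int) : Prop := out = solve_rec_alt l1 l2
instance (l1 : List String) (l2 : List String) (out : Int) : Decidable (Spec_solve_rec l1 l2 out) := by unfold Spec_solve_rec; infer_instance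

-- ===== CLAIM (what is proved, stated in full; the proofs are below) =====
def Claim_equal_solve_rec : Prop := ∀ (l1 : List String) (l2 : List String), Dom_solve_rec l1 l2 → Pre_solve_rec l1 l2 → Spec_solve_rec l1 l2 (solve_rec l1 l2)

-- ===== LEMMAS AND PROOFS =====

-- value that dfs adds to its accumulator in the unrestricted (may-switch-lane) case
def dpF (l1 l2 : List String) (lane : Int) (i : Nat) : Int :=
  if l1.length ≤ i then 0
  else
    (if PySem.List.pyGetD (if lane = 1 then l1 else l2) (i : Int) "" = "x" then 1 else 0) +
      min (dpF l1 l2 lane (i + 1))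
        ((if PySem.List.pyGetD (if -lane = 1 then l1 else l2) (i : Int) "" = "x" then 1 else 0) +
          dpF l1 l2 (-lane) (i + 1))
termination_by l1.length - i

lemma dpF_of_le (l1 l2 : List String) (lane : Int) (i : Nat) (h : l1.length ≤ i) :
    dpF l1 l2 lane i = 0 := by
  unfold dpF; simp [h]

lemma dfs_succ (l1 l2 : List String) (f : Nat) (lane : Int) (i : Nat) (s : Int)
    (parent : Int × Int) :
    solve_rec.dfs l1 l2 (f + 1) lane i s parent =
      if l1.length ≤ i then s
      else
        let road := if lane = 1 then l1 else l2
        let pot : Int := if PySem.List.pyGetD road (i : Int) "" = "x" then 1 else 0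
        let newsum := s + pot
        let curr_id : Int × Int := (lane, (i : Int))
        let go_right := solve_rec.dfs l1 l2 f lane (i + 1) newsum curr_id
        if (-lane, (i : Int)) = parent then go_right
        else min go_right (solve_rec.dfs l1 l2 f (-lane) i newsum curr_id) := rfl

lemma dfs_eq (l1 l2 : List String) : ∀ (fuel : Nat), ∀ (i : Nat),
    2 * (l1.length - i) + 2 ≤ fuel →
    ∀ (lane : Int) (s : Int) (parent : Int × Int),
    solve_rec.dfs l1 l2 fuel lane i s parent =
      s + (if l1.length ≤ i then 0
           else if (-lane, (i : Int)) = parent then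
             (if PySem.List.pyGetD (if lane = 1 then l1 else l2) (i : Int) "" = "x" then 1 else 0)
               + dpF l1 l2 lane (i + 1)
           else dpF l1 l2 lane i) := by
  intro fuel
  induction fuel using Nat.strong_induction_on with
  | _ fuel ih =>
  intro i hfuel lane s parent
  obtain ⟨f, rfl⟩ : ∃ f, fuel = f + 1 := ⟨fuel - 1, by omega⟩
  by_cases hlen : l1.length ≤ i
  · rw [dfs_succ]; simp [hlen]
  · have hgr : ∀ (ln : Int) (s' : Int),
        solve_rec.dfs l1 l2 f ln (i + 1) s' (lane, (i : Int)) = s' + dpF l1 l2 ln (i + 1) := by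
      intro ln s'
      rw [ih f (by omega) (i + 1) (by omega) ln s' (lane, (i : Int))]
      by_cases h1 : l1.length ≤ i + 1
      · rw [dpF_of_le l1 l2 ln (i + 1) h1]; simp [h1]
      · simp [h1]
    -- unfold the switch call once: its parent forces the restricted branch
    have hswitch :
        solve_rec.dfs l1 l2 f (-lane) i
            (s + (if PySem.List.pyGetD (if lane = 1 then l1 else l2) (i : Int) "" = "x" then 1 else 0))
            (lane, (i : Int)) =
          s + (if PySem.List.pyGetD (if lane = 1 then l1 else l2) (i : Int) "" = "x" then 1 else 0)
            + (if PySem.List.pyGetD (if -lane = 1 then l1 else l2) (i : Int) "" = "x" then 1 else 0)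
            + dpF l1 l2 (-lane) (i + 1) := by
      obtain ⟨g, rfl⟩ : ∃ g, f = g + 1 := ⟨f - 1, by omega⟩
      have hsw : ∀ (s' : Int),
          solve_rec.dfs l1 l2 g (-lane) (i + 1) s' ((-lane), (i : Int)) =
            s' + dpF l1 l2 (-lane) (i + 1) := by
        intro s'
        rw [ih g (by omega) (i + 1) (by omega) (-lane) s' ((-lane), (i : Int))]
        by_cases h1 : l1.length ≤ i + 1
        · rw [dpF_of_le l1 l2 (-lane) (i + 1) h1]; simp [h1]
        · simp [h1]
      rw [dfs_succ, if_neg hlen]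
      simp only [neg_neg, eq_self_iff_true, if_true]
      rw [hsw _]
    have hdp : dpF l1 l2 lane i =
        (if PySem.List.pyGetD (if lane = 1 then l1 else l2) (i : Int) "" = "x" then 1 else 0) +
          min (dpF l1 l2 lane (i + 1))
            ((if PySem.List.pyGetD (if -lane = 1 then l1 else l2) (i : Int) "" = "x" then 1 else 0) +
              dpF l1 l2 (-lane) (i + 1)) := by
      rw [dpF, if_neg hlen]
    rw [dfs_succ, if_neg hlen]
    by_cases hp : ((-lane, (i : Int)) : Int × Int) = parent
    · simp only [if_pos hp]
      rw [hgr lane _]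
      rw [if_neg hlen]
      omega
    · simp only [if_neg hp]
      rw [hgr lane _, hswitch]
      rw [if_neg hlen, hdp]
      omega

lemma dfs_eq' (l1 l2 : List String) (fuel : Nat) (lane : Int) (i : Nat) (s : Int)
    (parent : Int × Int) (hf : 2 * (l1.length - i) + 2 ≤ fuel)
    (hp : ((-lane, (i : Int)) : Int × Int) ≠ parent) :
    solve_rec.dfs l1 l2 fuel lane i s parent = s + dpF l1 l2 lane i := by
  rw [dfs_eq l1 l2 fuel i hf lane s parent]
  by_cases h : l1.length ≤ i
  · rw [dpF_of_le l1 l2 lane i h]; simp [h]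
  · simp [h, hp]

lemma foldl_dp (l1 l2 : List String) (h : l1.length ≤ l2.length) :
    ∀ (m i : Nat), l1.length - i ≤ m → i ≤ l1.length →
    (((l1.zip l2).drop i).reverse).foldl solve_rec_alt.step (0, 0) =
      (dpF l1 l2 1 i, dpF l1 l2 (-1) i) := by
  have hzlen : (l1.zip l2).length = l1.length := by
    simp [List.length_zip]; omega
  intro m
  induction m with
  | zero =>
    intro i hm hi
    have hieq : i = l1.length := by omega
    have hdrop : (l1.zip l2).drop i = [] := by
      apply List.drop_eq_nil_of_le; omega
    rw [hdrop, dpF_of_le l1 l2 1 i (by omega), dpF_of_le l1 l2 (-1) i (by omega)]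
    simp [solve_rec_alt.step]
  | succ m ih =>
    intro i hm hi
    by_cases hlt : i < l1.length
    · have hiz : i < (l1.zip l2).length := by omega
      have hdrop : (l1.zip l2).drop i = (l1.zip l2)[i] :: (l1.zip l2).drop (i + 1) :=
        List.drop_eq_getElem_cons hiz
      have hget : (l1.zip l2)[i] = (l1[i]'(by omega), l2[i]'(by omega)) := by
        simp [List.getElem_zip]
      have hih := ih (i + 1) (by omega) (by omega)
      rw [hdrop, List.reverse_cons, List.foldl_append, hih]
      have hg1 : PySem.List.pyGetD l1 (i : Int) "" = l1[i]'(by omega) := by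
        rw [PySem.List.pyGetD_natCast]
        exact List.getD_eq_getElem l1 "" (by omega)
      have hg2 : PySem.List.pyGetD l2 (i : Int) "" = l2[i]'(by omega) := by
        rw [PySem.List.pyGetD_natCast]
        exact List.getD_eq_getElem l2 "" (by omega)
      have hd1 : dpF l1 l2 1 i =
          (if l1[i]'(by omega) = "x" then 1 else 0) +
            min (dpF l1 l2 1 (i + 1))
              ((if l2[i]'(by omega) = "x" then 1 else 0) + dpF l1 l2 (-1) (i + 1)) := by
        rw [dpF]
        norm_num [hlt, hg1, hg2,
          List.getElem?_eq_getElem (show i < l1.length by omega),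
          List.getElem?_eq_getElem (show i < l2.length by omega)]
      have hd2 : dpF l1 l2 (-1) i =
          (if l2[i]'(by omega) = "x" then 1 else 0) +
            min (dpF l1 l2 (-1) (i + 1))
              ((if l1[i]'(by omega) = "x" then 1 else 0) + dpF l1 l2 1 (i + 1)) := by
        rw [dpF]
        norm_num [hlt, hg1, hg2,
          List.getElem?_eq_getElem (show i < l1.length by omega),
          List.getElem?_eq_getElem (show i < l2.length by omega)]
      rw [hget, hd1, hd2]
      simp [solve_rec_alt.step]
    · have : l1.length ≤ i := by omega
      have hdrop : (l1.zip l2).drop i = [] := by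
        apply List.drop_eq_nil_of_le; omega
      rw [hdrop, dpF_of_le l1 l2 1 i this, dpF_of_le l1 l2 (-1) i this]
      simp [solve_rec_alt.step]

lemma filt_len (t : List String) : (t.filter (fun l => l == "x")).length = t.count "x" := by
  induction t with
  | nil => simp
  | cons a t ih => by_cases h : a == "x" <;> simp [List.filter_cons, List.count_cons, h, ih]

lemma total_eq (xs : List String) :
    ((xs.filter (fun l => l == "x")).map (fun _ => (1 : Int))).sum =
      (PySem.List.count xs "x" : Int) := by
  rw [PySem.List.count_eq]
  induction xs with
  | nil => simp
  | cons a t ih =>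
    by_cases h : a == "x" <;>
      simp [List.filter_cons, h, List.count_cons, filt_len] <;> omega

-- ===== VERDICT (by name: the statement is the Claim_ definition above) =====
theorem solve_rec_spec : Claim_equal_solve_rec := by
  intro l1 l2 _ hpre
  unfold Spec_solve_rec solve_rec solve_rec_alt
  have h3 := foldl_dp l1 l2 hpre l1.length 0 (by omega) (by omega)
  simp only [List.drop_zero] at h3
  rw [dfs_eq' l1 l2 (2 * l1.length + 2) 1 0 0 (0, -1) (by omega) (by decide),
    dfs_eq' l1 l2 (2 * l1.length + 2) (-1) 0 0 (0, -1) (by omega) (by decide),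
    h3, total_eq]
  simp
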